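-- pv_equiv track=rewrite | github.com/alizhantulep/Web_dev_2nd_attestation | task1/codingBat/String-2/6xyz.py | xyz_there
-- ===== SOURCE A (Python) =====
-- def xyz_there(str):
--   count=0
--   countt=0
--   for i in range (len(str)):
--     if str[i:i+4] == ".xyz":
--       count=count+1
--     if str[i:i+3] == "xyz":
--       countt=countt+1
--   return countt > count
-- ===== SOURCE B (Python) =====
-- def xyz_there(str):
--   for i in range(len(str)):
--     if str[i:i+3] == "xyz" and (i == 0 or str[i-1] != "."):
--       return True
--   return False
-- ===== Notes on version B (the rewrite author's own statement) =====
-- stated objective: simpler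
-- what changed: Instead of tallying two full-string counters (occurrences of the pattern with and without a preceding period) and comparing them at the end, B makes a single scan that returns True immediately at the first occurrence not preceded by a period.
import Mathlib
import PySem

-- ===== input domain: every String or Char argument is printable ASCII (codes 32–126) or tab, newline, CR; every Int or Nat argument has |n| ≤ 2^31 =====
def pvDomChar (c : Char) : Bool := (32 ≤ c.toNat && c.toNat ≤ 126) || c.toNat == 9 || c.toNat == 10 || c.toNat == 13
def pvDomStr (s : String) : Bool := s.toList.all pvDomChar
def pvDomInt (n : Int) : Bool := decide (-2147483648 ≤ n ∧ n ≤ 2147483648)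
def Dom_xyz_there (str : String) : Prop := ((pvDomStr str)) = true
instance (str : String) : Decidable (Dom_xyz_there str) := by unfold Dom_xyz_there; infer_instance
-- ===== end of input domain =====

-- B replaces A's two running counters (pattern occurrences with and without a preceding period,
-- compared at the end) by a single early-exit scan for an occurrence not preceded by a period.

-- ===== PORT A =====
def xyz_there (str : String) : Bool :=
  let s := str.toList
  let r := (PySem.List.pyRange 0 (PySem.Str.len str) 1).foldl
    (fun (acc : Int × Int) i =>
      let acc1 := if PySem.List.slice s (some i) (some (i + 4)) = ['.', 'x', 'y', 'z']
                  then (acc.1 + 1, acc.2) else acc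
      if PySem.List.slice s (some i) (some (i + 3)) = ['x', 'y', 'z']
      then (acc1.1, acc1.2 + 1) else acc1)
    (0, 0)
  decide (r.2 > r.1)

-- ===== PORT B =====
def xyz_there_alt (str : String) : Bool :=
  let s := str.toList
  (PySem.List.pyRange 0 (PySem.Str.len str) 1).any (fun i =>
    decide (PySem.List.slice s (some i) (some (i + 3)) = ['x', 'y', 'z']) &&
    (decide (i = 0) || decide (PySem.List.pyGetD s (i - 1) ' ' ≠ '.')))

-- ===== PRECONDITION & SPEC =====
def Spec_xyz_there (str : String) (out : Bool) : Prop := out = xyz_there_alt str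
instance (str : String) (out : Bool) : Decidable (Spec_xyz_there str out) := by unfold Spec_xyz_there; infer_instance

-- ===== CLAIM (what is proved, stated in full; the proofs are below) =====
def Claim_equal_xyz_there : Prop := ∀ (str : String), Dom_xyz_there str → Spec_xyz_there str (xyz_there str)

-- ===== LEMMAS AND PROOFS =====

-- number of positions i with s[i:i+4] == ".xyz"
def pvCntA : List Char → Nat
  | [] => 0
  | c :: t => (if (c :: t).take 4 = ['.', 'x', 'y', 'z'] then 1 else 0) + pvCntA t

-- number of positions i with s[i:i+3] == "xyz"
def pvCntB : List Char → Nat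
  | [] => 0
  | c :: t => (if (c :: t).take 3 = ['x', 'y', 'z'] then 1 else 0) + pvCntB t

-- number of "free" xyz positions (not preceded by '.'; p = "previous char is '.'")
def pvCntF : Bool → List Char → Nat
  | _, [] => 0
  | p, c :: t => (if (c :: t).take 3 = ['x', 'y', 'z'] ∧ p = false then 1 else 0) + pvCntF (c == '.') t

-- early-exit form of the same predicate
def pvAnyF : Bool → List Char → Bool
  | _, [] => false
  | p, c :: t => (decide ((c :: t).take 3 = ['x', 'y', 'z']) && !p) || pvAnyF (c == '.') t

theorem pvAnyF_eq (s : List Char) : ∀ p, pvAnyF p s = decide (pvCntF p s ≠ 0) := by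
  induction s with
  | nil => intro p; simp [pvAnyF, pvCntF]
  | cons c t ih => intro p; simp [pvAnyF, pvCntF, ih, Bool.and_assoc]
theorem pvCnt_rel (s : List Char) : ∀ p : Bool,
    pvCntB s = pvCntA s + pvCntF p s + (if p = true ∧ s.take 3 = ['x', 'y', 'z'] then 1 else 0) := by
  induction s with
  | nil => intro p; simp [pvCntA, pvCntB, pvCntF]
  | cons c t ih =>
    intro p
    have h := ih (c == '.')
    simp only [pvCntA, pvCntB, pvCntF, List.take_succ_cons] at h ⊢
    split_ifs at h ⊢ <;> simp_all <;> omega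

theorem pvSliceM (s : List Char) (k : Nat) (m : Int) (hm : 0 ≤ m) :
    PySem.List.slice s (some ((k : Nat) : Int)) (some (((k : Nat) : Int) + m)) = (s.drop k).take m.toNat := by
  rw [PySem.List.slice_toNat s (by positivity) (by omega)]
  congr 1
  omega

theorem pvSlice3 (s : List Char) (k : Nat) :
    PySem.List.slice s (some ((k : Nat) : Int)) (some (((k : Nat) : Int) + 3)) = (s.drop k).take 3 := by
  rw [pvSliceM s k 3 (by norm_num)]
  rfl

theorem pvSlice4 (s : List Char) (k : Nat) :
    PySem.List.slice s (some ((k : Nat) : Int)) (some (((k : Nat) : Int) + 4)) = (s.drop k).take 4 := by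
  rw [pvSliceM s k 4 (by norm_num)]
  rfl


theorem pvFoldA (s : List Char) : ∀ (c0 c1 : Int),
    (List.range s.length).foldl
      (fun (acc : Int × Int) (k : Nat) =>
        if (s.drop k).take 3 = ['x', 'y', 'z'] then
          ((if (s.drop k).take 4 = ['.', 'x', 'y', 'z'] then (acc.1 + 1, acc.2) else acc).1,
           (if (s.drop k).take 4 = ['.', 'x', 'y', 'z'] then (acc.1 + 1, acc.2) else acc).2 + 1)
        else if (s.drop k).take 4 = ['.', 'x', 'y', 'z'] then (acc.1 + 1, acc.2) else acc)
      (c0, c1) = (c0 + pvCntA s, c1 + pvCntB s) := by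
  induction s with
  | nil => intro c0 c1; simp [pvCntA, pvCntB]
  | cons c t ih =>
    intro c0 c1
    rw [List.length_cons, List.range_succ_eq_map, List.foldl_cons, List.foldl_map]
    simp only [List.drop_succ_cons, List.drop_zero, pvCntA, pvCntB]
    split_ifs with h1 h2 h2 <;>
      refine (ih _ _).trans ?_ <;> simp only [Prod.mk.injEq] <;> push_cast <;> constructor <;> ring

theorem pvAnyB (s : List Char) : ∀ p : Bool,
    (List.range s.length).any
      (fun k => decide ((s.drop k).take 3 = ['x', 'y', 'z']) &&
        !(if k = 0 then p else (s.getD (k - 1) ' ' == '.'))) = pvAnyF p s := by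
  induction s with
  | nil => intro p; simp [pvAnyF]
  | cons c t ih =>
    intro p
    rw [List.length_cons, List.range_succ_eq_map, List.any_cons, List.any_map]
    have hfun : ((fun (k : Nat) => decide (((c :: t).drop k).take 3 = ['x', 'y', 'z']) &&
        !(if k = 0 then p else ((c :: t).getD (k - 1) ' ' == '.'))) ∘ Nat.succ) =
        (fun (k : Nat) => decide ((t.drop k).take 3 = ['x', 'y', 'z']) &&
        !(if k = 0 then (c == '.') else (t.getD (k - 1) ' ' == '.'))) := by
      funext k
      cases k with
      | zero => rfl
      | succ n => rfl
    rw [hfun, ih (c == '.')]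
    simp [pvAnyF]

-- ===== VERDICT (by name: the statement is the Claim_ definition above) =====
theorem xyz_there_spec : Claim_equal_xyz_there := by
  intro str _
  unfold Spec_xyz_there xyz_there xyz_there_alt
  simp only [PySem.Str.len_eq, PySem.List.pyRange_one, sub_zero, Int.toNat_natCast,
    List.foldl_map, List.any_map, zero_add, pvSlice3, pvSlice4]
  simp only [Function.comp_def, pvSlice3]
  rw [pvFoldA str.toList 0 0]
  have hB : (fun (k : Nat) => decide ((str.toList.drop k).take 3 = ['x', 'y', 'z']) &&
      (decide (((k : Nat) : Int) = 0) ||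
        decide (PySem.List.pyGetD str.toList (((k : Nat) : Int) - 1) ' ' ≠ '.'))) =
      (fun (k : Nat) => decide ((str.toList.drop k).take 3 = ['x', 'y', 'z']) &&
      !(if k = 0 then false else (str.toList.getD (k - 1) ' ' == '.'))) := by
    funext k
    cases k with
    | zero => simp
    | succ n =>
      have h2 : ¬(((n : Nat) : Int) + 1 = 0) := by omega
      simp [h2, PySem.List.pyGetD_natCast, List.getD]
      rw [Bool.beq_eq_decide_eq]
  rw [hB, pvAnyB str.toList false, pvAnyF_eq]
  have h := pvCnt_rel str.toList false
  simp only [Bool.false_eq_true, false_and, if_false] at h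
  rw [decide_eq_decide]
  omega
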